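-- pv_equiv track=rewrite | github.com/thcborges/CompCEDERJ-FP | ADs-2016.2/AD2/AD2Q1.py | obterSetor
-- ===== SOURCE A (Python) =====
-- def car(lis):
--     return lis[0]
--
-- def cdr(lis):
--     return lis[1:]
--
-- def cons(x, lis):
--     return [x] + lis
--
-- def obterSetor(lista, inicio, fim):
--     if lista == [] or inicio > fim or inicio < 1:
--         return []
--     else:
--         if inicio > 1:
--             return obterSetor(cdr(lista), inicio - 1, fim - 1)
--         else:
--             return cons(car(lista), obterSetor(cdr(lista), inicio, fim - 1))
-- ===== SOURCE B (Python) =====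
-- def obterSetor(lista, inicio, fim):
--     if lista == [] or inicio > fim or inicio < 1:
--         return []
--     res = []
--     i = 1
--     for x in lista:
--         if i > fim:
--             break
--         if i >= inicio:
--             res.append(x)
--         i += 1
--     return res
-- ===== Notes on version B (the rewrite author's own statement) =====
-- stated objective: simpler
-- what changed: Replaces A's cdr-recursion with decremented indices by a single iterative pass keeping a 1-based position counter, appending elements between inicio and fim and stopping early past fim.
import Mathlib
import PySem

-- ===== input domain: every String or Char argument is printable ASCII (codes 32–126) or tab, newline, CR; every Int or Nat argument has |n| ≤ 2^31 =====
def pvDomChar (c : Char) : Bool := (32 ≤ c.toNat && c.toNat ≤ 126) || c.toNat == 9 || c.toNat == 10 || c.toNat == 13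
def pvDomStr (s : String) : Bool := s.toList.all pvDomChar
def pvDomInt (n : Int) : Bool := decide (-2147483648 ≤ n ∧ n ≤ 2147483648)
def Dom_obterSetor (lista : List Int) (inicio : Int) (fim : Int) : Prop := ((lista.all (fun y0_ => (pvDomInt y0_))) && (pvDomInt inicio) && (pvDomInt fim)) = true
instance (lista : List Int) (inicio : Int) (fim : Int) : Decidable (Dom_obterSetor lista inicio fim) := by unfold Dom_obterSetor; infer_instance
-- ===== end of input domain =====

-- B replaces A's cdr/cons recursion by a single iterative pass with a 1-based position counter (simpler, no recursion).


-- ===== PORT A =====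
-- literal port of A: the 'lista == []' guard is the [] pattern; car/cdr are head/tail of the cons pattern
def obterSetor (lista : List Int) (inicio : Int) (fim : Int) : List Int :=
  match lista with
  | [] => []
  | x :: xs =>
    if inicio > fim ∨ inicio < 1 then []
    else if inicio > 1 then obterSetor xs (inicio - 1) (fim - 1)
    else x :: obterSetor xs inicio (fim - 1)

-- ===== PORT B =====
-- the for-loop of Source B: 'rest' is the remainder of the iteration, i the position counter, res the accumulator
def obterSetorLoop (rest : List Int) (i : Int) (inicio : Int) (fim : Int) (res : List Int) : List Int :=
  match rest with
  | [] => res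
  | x :: xs =>
    if i > fim then res
    else obterSetorLoop xs (i + 1) inicio fim (if i ≥ inicio then res ++ [x] else res)

def obterSetor_alt (lista : List Int) (inicio : Int) (fim : Int) : List Int :=
  if lista = [] ∨ inicio > fim ∨ inicio < 1 then []
  else obterSetorLoop lista 1 inicio fim []

-- ===== PRECONDITION & SPEC =====
def Spec_obterSetor (lista : List Int) (inicio : Int) (fim : Int) (out : List Int) : Prop := out = obterSetor_alt lista inicio fim
instance (lista : List Int) (inicio : Int) (fim : Int) (out : List Int) : Decidable (Spec_obterSetor lista inicio fim out) := by unfold Spec_obterSetor; infer_instance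

-- ===== CLAIM (what is proved, stated in full; the proofs are below) =====
def Claim_equal_obterSetor : Prop := ∀ (lista : List Int) (inicio : Int) (fim : Int), Dom_obterSetor lista inicio fim → Spec_obterSetor lista inicio fim (obterSetor lista inicio fim)

-- ===== LEMMAS AND PROOFS =====

-- A returns [] whenever inicio > fim
theorem obterSetor_empty_of_gt (lista : List Int) (inicio fim : Int) (h : inicio > fim) :
    obterSetor lista inicio fim = [] := by
  cases lista with
  | nil => simp [obterSetor]
  | cons x xs => simp [obterSetor, h]

-- loop invariant: the loop from position i computes A's result on the remaining list with shifted indices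
theorem obterSetorLoop_eq (xs : List Int) : ∀ (i : Int) (inicio fim : Int) (res : List Int),
    obterSetorLoop xs i inicio fim res = res ++ obterSetor xs (max (inicio - i + 1) 1) (fim - i + 1) := by
  induction xs with
  | nil => intro i inicio fim res; simp [obterSetorLoop, obterSetor]
  | cons x xs ih =>
    intro i inicio fim res
    by_cases hfi : i > fim
    · have hg2 : max (inicio - i + 1) 1 > fim - i + 1 := by omega
      rw [obterSetor_empty_of_gt _ _ _ hg2, List.append_nil]
      simp [obterSetorLoop, hfi]
    · by_cases hin : i ≥ inicio
      · have ha : max (inicio - i + 1) 1 = 1 := by omega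
        have ha' : max (inicio - (i + 1) + 1) 1 = 1 := by omega
        have hguard : ¬ ((1:Int) > fim - i + 1 ∨ (1:Int) < 1) := by omega
        simp only [obterSetorLoop, if_neg hfi, if_pos hin]
        rw [ih, ha', ha]
        simp only [obterSetor]
        rw [if_neg hguard, if_neg (by omega : ¬ (1:Int) > 1),
            show fim - (i + 1) + 1 = fim - i + 1 - 1 from by ring]
        simp
      · have ha : max (inicio - i + 1) 1 = inicio - i + 1 := by omega
        simp only [obterSetorLoop, if_neg hfi, if_neg hin]
        rw [ih, ha]
        by_cases hord : inicio > fim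
        · rw [obterSetor_empty_of_gt _ _ _ (by omega),
              obterSetor_empty_of_gt _ _ _ (by omega)]
        · have hguard : ¬ (inicio - i + 1 > fim - i + 1 ∨ inicio - i + 1 < 1) := by omega
          have ha' : max (inicio - (i + 1) + 1) 1 = inicio - i := by omega
          rw [ha']
          simp only [obterSetor]
          rw [if_neg hguard, if_pos (by omega : inicio - i + 1 > 1),
              show inicio - i + 1 - 1 = inicio - i from by ring,
              show fim - i + 1 - 1 = fim - i from by ring,
              show fim - (i + 1) + 1 = fim - i from by ring]

-- ===== VERDICT (by name: the statement is the Claim_ definition above) =====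
theorem obterSetor_spec : Claim_equal_obterSetor := by
  intro lista inicio fim _
  unfold Spec_obterSetor obterSetor_alt
  by_cases hg : lista = [] ∨ inicio > fim ∨ inicio < 1
  · rw [if_pos hg]
    rcases hg with h | h | h
    · simp [h, obterSetor]
    · exact obterSetor_empty_of_gt _ _ _ h
    · cases lista with
      | nil => simp [obterSetor]
      | cons x xs => simp [obterSetor, h]
  · rw [if_neg hg, obterSetorLoop_eq]
    simp only [not_or, not_lt] at hg
    obtain ⟨hne, hle, h1⟩ := hg
    rw [show max (inicio - 1 + 1) 1 = inicio from by omega,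
        show fim - 1 + 1 = fim from by ring, List.nil_append]
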